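-- pv_equiv track=rewrite | github.com/evgeniac10/baekjoon | 백준/src/백준_2004번.py | count2Num
-- ===== SOURCE A (Python) =====
-- def count2Num(num):
--     if num <2:
--         return 0
--     count =0
--
--     while num>=2:
--         count += num//2
--         num = num//2
--     return count
-- ===== SOURCE B (Python) =====
-- def count2Num(num):
--     if num < 2:
--         return 0
--     return num - bin(num).count('1')
-- ===== Notes on version B (the rewrite author's own statement) =====
-- stated objective: faster
-- what changed: Replaces the halving accumulation loop with the closed form num - popcount(num), by Legendre's formula for the exponent of two in num!.
import Mathlib
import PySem

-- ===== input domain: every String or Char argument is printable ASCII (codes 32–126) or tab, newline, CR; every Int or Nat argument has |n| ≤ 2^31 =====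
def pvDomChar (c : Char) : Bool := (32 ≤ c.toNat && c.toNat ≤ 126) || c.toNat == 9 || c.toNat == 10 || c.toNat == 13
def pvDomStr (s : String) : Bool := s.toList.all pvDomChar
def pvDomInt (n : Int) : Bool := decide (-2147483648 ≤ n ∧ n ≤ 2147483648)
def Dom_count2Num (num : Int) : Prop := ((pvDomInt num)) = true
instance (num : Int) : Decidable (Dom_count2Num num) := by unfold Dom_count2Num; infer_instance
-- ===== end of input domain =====

-- B replaces A's halving accumulation loop by the closed form num - popcount(num).

-- ===== PORT A =====
-- the while loop: count += num//2; num = num//2, while num >= 2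
def count2NumLoop (num count : Int) : Int :=
  if h : 2 ≤ num then
    count2NumLoop (PySem.Int.floordiv num 2) (count + PySem.Int.floordiv num 2)
  else count
termination_by num.toNat
decreasing_by
  have := PySem.Int.floordiv_eq_ediv_of_pos (a := num) (b := 2) (by omega)
  omega

def count2Num (num : Int) : Int :=
  if num < 2 then 0
  else count2NumLoop num 0

-- ===== PORT B =====
-- bin(num).count('1') ported as PySem.Int.bitCount (exact popcount of |num|; guard keeps num ≥ 2)
def count2Num_alt (num : Int) : Int :=
  if num < 2 then 0
  else num - (PySem.Int.bitCount num : Int)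

-- ===== PRECONDITION & SPEC =====
def Spec_count2Num (num : Int) (out : Int) : Prop := out = count2Num_alt num
instance (num : Int) (out : Int) : Decidable (Spec_count2Num num out) := by unfold Spec_count2Num; infer_instance

-- ===== CLAIM (what is proved, stated in full; the proofs are below) =====
def Claim_equal_count2Num : Prop := ∀ (num : Int), Dom_count2Num num → Spec_count2Num num (count2Num num)

-- ===== LEMMAS AND PROOFS =====

-- loop invariant: for num ≥ 1, the loop returns count + num - popcount(num)
theorem count2NumLoop_eq (n : Nat) (num count : Int) (hn : num.toNat = n) (h1 : 1 ≤ num) :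
    count2NumLoop num count = count + num - (PySem.Int.bitCount num : Int) := by
  induction n using Nat.strong_induction_on generalizing num count with
  | _ n ih =>
    rw [count2NumLoop]
    by_cases h2 : 2 ≤ num
    · have hfd : PySem.Int.floordiv num 2 = num / 2 :=
        PySem.Int.floordiv_eq_ediv_of_pos (by omega)
      have hmd : PySem.Int.mod num 2 = num % 2 :=
        PySem.Int.mod_eq_emod_of_pos (by omega)
      have hbc := PySem.Int.bitCount_of_pos (n := num) (by omega)
      rw [dif_pos h2, hfd]
      have hrec := ih (num / 2).toNat (by omega) (num / 2) (count + num / 2) rfl (by omega)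
      rw [hrec, hbc, hfd, hmd]
      set c := PySem.Int.bitCount (num / 2) with hc
      push_cast
      omega
    · rw [dif_neg h2]
      -- num = 1: bitCount 1 = 1
      have : num = 1 := by omega
      subst this
      have : PySem.Int.bitCount 1 = 1 := by decide
      rw [this]
      push_cast; ring

-- ===== VERDICT (by name: the statement is the Claim_ definition above) =====
theorem count2Num_spec : Claim_equal_count2Num := by
  intro num _
  unfold Spec_count2Num count2Num count2Num_alt
  by_cases h : num < 2
  · simp [h]
  · rw [if_neg h, if_neg h, count2NumLoop_eq num.toNat num 0 rfl (by omega)]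
    ring
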